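-- pv_equiv track=rewrite | github.com/SebastianHylander/AlgorithmicProblemsolving | bar_shelf/bar_shelf_RBT.py | count_half_suffix
-- ===== SOURCE A (Python) =====
-- RED = True
--
-- class RBNode:
--     def __init__(self, key, color, left=None, right=None, parent=None):
--         self.key = key
--         self.color = color
--         self.left = left
--         self.right = right
--         self.parent = parent
--         self.size = 1
--
--     @staticmethod
--     def isRed(node):
--         return node is not None and node.color == RED
--
--     @staticmethod
--     def size(node):
--         return 0 if not node else node.size
--
-- def put(node, value):
--     if not node:
--         return RBNode(key = value, color = RED)
--
--     cmp = node.key - value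
--     if cmp > 0:
--         node.left = put(node.left, value)
--     elif cmp < 0:
--         node.right = put(node.right, value)
--     else:
--         node.size += 1
--
--     if RBNode.isRed(node.right) and not RBNode.isRed(node.left):
--         node = rotateLeft(node)
--
--     if RBNode.isRed(node.left) and RBNode.isRed(node.left.left):
--         node = rotateRight(node)
--
--     if RBNode.isRed(node.left) and RBNode.isRed(node.right):
--         flipColors(node)
--
--     node.size = 1 + RBNode.size(node.left) + RBNode.size(node.right)
--
--     return node
--
-- def rotateRight(node):
--     x = node.left
--     node.left = x.right
--     x.right = node
--     x.color = node.color
--     node.color = RED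
--     x.size = node.size
--     node.size = RBNode.size(node.left) + RBNode.size(node.right) + 1
--     return x
--
-- def rotateLeft(node):
--     x = node.right
--     node.right = x.left
--     x.left = node
--     x.color = node.color
--     node.color = RED
--     x.size = node.size
--     node.size = RBNode.size(node.left) + RBNode.size(node.right) + 1
--     return x
--
-- def flipColors(node):
--     node.color = not node.color
--     node.left.color = not node.left.color
--     node.right.color = not node.right.color
--
-- def rank(node, key):
--     if not node:
--         return 0
--     cmp = node.key - key
--     if cmp < 0:
--         return 1 + RBNode.size(node.left) + rank(node.right, key)
--     elif cmp > 0: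
--         return rank(node.left, key)
--     else:
--         return RBNode.size(node.left) + 1
--
-- def count_half_suffix(arr):
--     suffix = None
--     counts = []
--     for x in reversed(arr):
--         count = rank(suffix, x//2)
--         counts.append(count)
--         suffix = put(suffix, x)
--     counts.reverse()
--     return counts
-- ===== SOURCE B (Python) =====
-- def count_half_suffix(arr):
--     counts = [0] * len(arr)
--     seen = set()
--     for i in range(len(arr) - 1, -1, -1):
--         t = arr[i] // 2
--         counts[i] = sum(1 for v in seen if v <= t)
--         seen.add(arr[i])
--     return counts
-- ===== Notes on version B (the rewrite author's own statement) =====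
-- stated objective: simpler
-- what changed: Replaced the hand-rolled red-black order-statistics tree (put/rotate/flip/rank) with a plain set of suffix values and a linear scan counting distinct values <= arr[i]//2 per index, walking indices from right to left.
import Mathlib
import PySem

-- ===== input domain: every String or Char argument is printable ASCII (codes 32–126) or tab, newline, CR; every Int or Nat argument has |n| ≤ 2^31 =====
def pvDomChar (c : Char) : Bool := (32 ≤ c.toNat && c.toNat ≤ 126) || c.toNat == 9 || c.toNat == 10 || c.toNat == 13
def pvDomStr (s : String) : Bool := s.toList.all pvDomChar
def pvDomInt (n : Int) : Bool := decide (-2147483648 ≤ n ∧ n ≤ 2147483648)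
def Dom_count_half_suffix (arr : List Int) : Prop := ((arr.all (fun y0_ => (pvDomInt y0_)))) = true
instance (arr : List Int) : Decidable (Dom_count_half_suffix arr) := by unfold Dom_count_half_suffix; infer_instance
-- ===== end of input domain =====

-- B replaces A's red-black order-statistics tree with a plain set of seen suffix values
-- and a linear distinct-count per index (objective: simpler; no speed claim).

-- ===== PORT A =====
-- A's RBNode: key, color (RED = true), left, right, size field.
inductive RBT : Type
  | nil : RBT
  | node : Int → Bool → RBT → RBT → Int → RBT
deriving DecidableEq, Repr

def isRed : RBT → Bool
  | RBT.node _ c _ _ _ => c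
  | RBT.nil => false

def sizeF : RBT → Int
  | RBT.nil => 0
  | RBT.node _ _ _ _ s => s

def leftT : RBT → RBT
  | RBT.nil => RBT.nil
  | RBT.node _ _ l _ _ => l

def rightT : RBT → RBT
  | RBT.nil => RBT.nil
  | RBT.node _ _ _ r _ => r

-- rotateLeft: x = node.right; node.right = x.left; x.left = node; x.color = node.color;
-- node.color = RED; x.size = node.size; node.size = size(left)+size(right)+1
def rotateLeft : RBT → RBT
  | RBT.node k c l (RBT.node rk _ rl rr _) s =>
      RBT.node rk c (RBT.node k true l rl (sizeF l + sizeF rl + 1)) rr s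
  | t => t  -- unreachable: guarded in put by isRed(node.right), so node.right is a node

def rotateRight : RBT → RBT
  | RBT.node k c (RBT.node lk _ ll lr _) r s =>
      RBT.node lk c ll (RBT.node k true lr r (sizeF lr + sizeF r + 1)) s
  | t => t  -- unreachable: guarded in put by isRed(node.left)

def flipColors : RBT → RBT
  | RBT.node k c (RBT.node lk lc ll lr ls) (RBT.node rk rc rl rr rs) s =>
      RBT.node k (!c) (RBT.node lk (!lc) ll lr ls) (RBT.node rk (!rc) rl rr rs) s
  | t => t  -- unreachable: guarded in put by isRed of both children

-- final statement of put: node.size = 1 + size(left) + size(right); return node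
def resize : RBT → RBT
  | RBT.nil => RBT.nil
  | RBT.node k c l r _ => RBT.node k c l r (1 + sizeF l + sizeF r)

-- the three guarded fix-up statements of Python's put, in their order
def fixup (n : RBT) : RBT :=
  let n := if isRed (rightT n) && !isRed (leftT n) then rotateLeft n else n
  let n := if isRed (leftT n) && isRed (leftT (leftT n)) then rotateRight n else n
  if isRed (leftT n) && isRed (rightT n) then flipColors n else n

def put : RBT → Int → RBT
  | RBT.nil, v => RBT.node v true RBT.nil RBT.nil 1
  | RBT.node k c l r s, v =>
    let cmp := k - v
    let st :=
      if cmp > 0 then (put l v, r, s)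
      else if cmp < 0 then (l, put r v, s)
      else (l, r, s + 1)
    resize (fixup (RBT.node k c st.1 st.2.1 st.2.2))

def rank : RBT → Int → Int
  | RBT.nil, _ => 0
  | RBT.node k _ l r _, key =>
    let cmp := k - key
    if cmp < 0 then 1 + sizeF l + rank r key
    else if cmp > 0 then rank l key
    else sizeF l + 1

def count_half_suffix (arr : List Int) : List Int :=
  let st := arr.reverse.foldl
    (fun (st : RBT × List Int) x =>
      (put st.1 x, st.2 ++ [rank st.1 (PySem.Int.floordiv x 2)]))
    (RBT.nil, [])
  st.2.reverse

-- ===== PORT B =====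
-- Source B walks i from the last index down to 0: counts[i] is computed from `seen`
-- (the distinct values of arr[i+1:]), then arr[i] is added to `seen`.
-- Structural recursion processes the suffix first, exactly that descending loop.
def altGo : List Int → PySem.Set Int × List Int
  | [] => (PySem.Set.empty, [])
  | x :: rest =>
    let p := altGo rest
    let t := PySem.Int.floordiv x 2
    (PySem.Set.add p.1 x,
     ((p.1.countP (fun v => decide (v ≤ t)) : Nat) : Int) :: p.2)

def count_half_suffix_alt (arr : List Int) : List Int := (altGo arr).2

-- ===== PRECONDITION & SPEC =====
def Spec_count_half_suffix (arr : List Int) (out : List Int) : Prop := out = count_half_suffix_alt arr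
instance (arr : List Int) (out : List Int) : Decidable (Spec_count_half_suffix arr out) := by unfold Spec_count_half_suffix; infer_instance

-- ===== CLAIM (what is proved, stated in full; the proofs are below) =====
def Claim_equal_count_half_suffix : Prop := ∀ (arr : List Int), Dom_count_half_suffix arr → Spec_count_half_suffix arr (count_half_suffix arr)

-- ===== LEMMAS AND PROOFS =====

-- inorder keys of the tree (A never stores duplicates: the equal branch only bumps size)
def keysT : RBT → List Int
  | RBT.nil => []
  | RBT.node k _ l r _ => keysT l ++ k :: keysT r

-- size fields are correct node counts
def SzOk : RBT → Prop
  | RBT.nil => True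
  | RBT.node _ _ l r s => s = 1 + (keysT l).length + (keysT r).length ∧ SzOk l ∧ SzOk r

-- size fields correct except possibly at the root
def SzOkC : RBT → Prop
  | RBT.nil => True
  | RBT.node _ _ l r _ => SzOk l ∧ SzOk r

-- canonical sorted-distinct insert
def insD (x : Int) : List Int → List Int
  | [] => [x]
  | y :: ys => if x < y then x :: y :: ys else if x = y then y :: ys else y :: insD x ys

def insDs (s : List Int) (l : List Int) : List Int := l.foldl (fun a x => insD x a) s

def specFrom (s : List Int) : List Int → List Int
  | [] => []
  | x :: l' =>
    ((s.countP (fun v => decide (v ≤ PySem.Int.floordiv x 2)) : Nat) : Int)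
      :: specFrom (insD x s) l'

-- basic facts
theorem keysT_rotateLeft (t : RBT) : keysT (rotateLeft t) = keysT t := by
  cases t with
  | nil => rfl
  | node k c l r s =>
    cases r with
    | nil => rfl
    | node rk rc rl rr rs => simp [rotateLeft, keysT]

theorem keysT_rotateRight (t : RBT) : keysT (rotateRight t) = keysT t := by
  cases t with
  | nil => rfl
  | node k c l r s =>
    cases l with
    | nil => rfl
    | node lk lc ll lr ls => simp [rotateRight, keysT]

theorem keysT_flipColors (t : RBT) : keysT (flipColors t) = keysT t := by
  cases t with
  | nil => rfl
  | node k c l r s =>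
    cases l with
    | nil => rfl
    | node lk lc ll lr ls =>
      cases r with
      | nil => rfl
      | node rk rc rl rr rs => simp [flipColors, keysT]

theorem keysT_resize (t : RBT) : keysT (resize t) = keysT t := by
  cases t <;> rfl

theorem sizeF_of_SzOk (t : RBT) (h : SzOk t) : sizeF t = ((keysT t).length : Int) := by
  cases t with
  | nil => rfl
  | node k c l r s =>
    simp [SzOk] at h
    simp [sizeF, keysT, h.1]
    ring

theorem SzOkC_rotateLeft (t : RBT) (h : SzOkC t) : SzOkC (rotateLeft t) := by
  cases t with
  | nil => trivial
  | node k c l r s =>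
    cases r with
    | nil => exact h
    | node rk rc rl rr rs =>
      obtain ⟨hl, hr⟩ := h
      obtain ⟨hrs, hrl, hrr⟩ := hr
      refine ⟨⟨?_, hl, hrl⟩, hrr⟩
      rw [sizeF_of_SzOk l hl, sizeF_of_SzOk rl hrl]; ring

theorem SzOkC_rotateRight (t : RBT) (h : SzOkC t) : SzOkC (rotateRight t) := by
  cases t with
  | nil => trivial
  | node k c l r s =>
    cases l with
    | nil => exact h
    | node lk lc ll lr ls =>
      obtain ⟨hl, hr⟩ := h
      obtain ⟨hls, hll, hlr⟩ := hl
      refine ⟨hll, ⟨?_, hlr, hr⟩⟩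
      rw [sizeF_of_SzOk lr hlr, sizeF_of_SzOk r hr]; ring

theorem SzOkC_flipColors (t : RBT) (h : SzOkC t) : SzOkC (flipColors t) := by
  cases t with
  | nil => trivial
  | node k c l r s =>
    cases l with
    | nil => exact h
    | node lk lc ll lr ls =>
      cases r with
      | nil => exact h
      | node rk rc rl rr rs =>
        obtain ⟨hl, hr⟩ := h
        exact ⟨⟨hl.1, hl.2.1, hl.2.2⟩, ⟨hr.1, hr.2.1, hr.2.2⟩⟩

theorem SzOk_resize (t : RBT) (h : SzOkC t) : SzOk (resize t) := by
  cases t with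
  | nil => trivial
  | node k c l r s =>
    obtain ⟨hl, hr⟩ := h
    refine ⟨?_, hl, hr⟩
    rw [sizeF_of_SzOk l hl, sizeF_of_SzOk r hr]
theorem insD_mem (v z : Int) (s : List Int) : z ∈ insD v s ↔ z = v ∨ z ∈ s := by
  induction s with
  | nil => simp [insD]
  | cons y ys ih =>
    simp only [insD]
    split_ifs with h1 h2
    · simp
    · subst h2; simp
    · simp [ih]; tauto

theorem insD_sorted (v : Int) (s : List Int) (h : List.Pairwise (· < ·) s) :
    List.Pairwise (· < ·) (insD v s) := by
  induction s with
  | nil => simp [insD]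
  | cons y ys ih =>
    simp only [List.pairwise_cons] at h
    obtain ⟨hy, hys⟩ := h
    simp only [insD]
    split_ifs with h1 h2
    · refine List.pairwise_cons.2 ⟨?_, List.pairwise_cons.2 ⟨hy, hys⟩⟩
      intro b hb
      rcases List.mem_cons.1 hb with rfl | hb
      · exact h1
      · exact lt_trans h1 (hy b hb)
    · exact List.pairwise_cons.2 ⟨hy, hys⟩
    · refine List.pairwise_cons.2 ⟨?_, ih hys⟩
      intro b hb
      rcases (insD_mem v b ys).1 hb with rfl | hb
      · omega
      · exact hy b hb

theorem insD_append_lt (v k : Int) (R : List Int) (hvk : v < k) :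
    ∀ L, insD v (L ++ k :: R) = insD v L ++ k :: R := by
  intro L
  induction L with
  | nil => simp [insD, hvk]
  | cons y ys ih =>
    simp only [List.cons_append, insD]
    split_ifs <;> simp [ih]

theorem insD_append_gt (v k : Int) (R : List Int) :
    ∀ L, (∀ y ∈ L, y < v) → k < v → insD v (L ++ k :: R) = L ++ k :: insD v R := by
  intro L
  induction L with
  | nil =>
    intro _ hkv
    simp only [List.nil_append, insD]
    rw [if_neg (by omega), if_neg (by omega)]
  | cons y ys ih =>
    intro hL hkv
    have hyv : y < v := hL y (by simp)
    simp only [List.cons_append, insD]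
    rw [if_neg (by omega), if_neg (by omega), ih (fun z hz => hL z (by simp [hz])) hkv]

theorem insD_append_self (v : Int) (R : List Int) :
    ∀ L, (∀ y ∈ L, y < v) → insD v (L ++ v :: R) = L ++ v :: R := by
  intro L
  induction L with
  | nil =>
    intro _
    simp [insD]
  | cons y ys ih =>
    intro hL
    have hyv : y < v := hL y (by simp)
    simp only [List.cons_append, insD]
    rw [if_neg (by omega), if_neg (by omega), ih (fun z hz => hL z (by simp [hz]))]

-- decompose sortedness of an inorder list
theorem sorted_mid (L R : List Int) (k : Int) (h : List.Pairwise (· < ·) (L ++ k :: R)) :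
    List.Pairwise (· < ·) L ∧ List.Pairwise (· < ·) R ∧ (∀ y ∈ L, y < k) ∧ (∀ z ∈ R, k < z) := by
  rw [List.pairwise_append] at h
  obtain ⟨hL, hkR, hcross⟩ := h
  rw [List.pairwise_cons] at hkR
  exact ⟨hL, hkR.2, fun y hy => hcross y hy k (by simp), hkR.1⟩
-- the three guarded fix-up rotations preserve keys and child sizes
theorem fixup_spec (n : RBT) (h : SzOkC n) : keysT (fixup n) = keysT n ∧ SzOkC (fixup n) := by
  simp only [fixup]
  set a := if isRed (rightT n) && !isRed (leftT n) then rotateLeft n else n with ha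
  have pa : keysT a = keysT n ∧ SzOkC a := by
    rw [ha]; split_ifs
    · exact ⟨keysT_rotateLeft n, SzOkC_rotateLeft n h⟩
    · exact ⟨rfl, h⟩
  set b := if isRed (leftT a) && isRed (leftT (leftT a)) then rotateRight a else a with hb
  have pb : keysT b = keysT n ∧ SzOkC b := by
    rw [hb]; split_ifs
    · exact ⟨(keysT_rotateRight a).trans pa.1, SzOkC_rotateRight a pa.2⟩
    · exact pa
  split_ifs
  · exact ⟨(keysT_flipColors b).trans pb.1, SzOkC_flipColors b pb.2⟩
  · exact pb

theorem put_spec (t : RBT) (v : Int) :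
    List.Pairwise (· < ·) (keysT t) → SzOk t →
    keysT (put t v) = insD v (keysT t) ∧ SzOk (put t v) := by
  induction t with
  | nil =>
    intro _ _
    refine ⟨rfl, ?_⟩
    simp [put, SzOk, keysT]
  | node k c l r s ihl ihr =>
    intro hs hz
    simp only [SzOk] at hz
    obtain ⟨hzs, hzl, hzr⟩ := hz
    simp only [keysT] at hs
    obtain ⟨hsl, hsr, hLk, hkR⟩ := sorted_mid _ _ _ hs
    rcases lt_trichotomy v k with hvk | hvk | hvk
    · have e : put (RBT.node k c l r s) v = resize (fixup (RBT.node k c (put l v) r s)) := by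
        simp only [put]
        rw [if_pos (by omega : k - v > 0)]
      obtain ⟨ka, za⟩ := ihl hsl hzl
      have hfix := fixup_spec (RBT.node k c (put l v) r s) ⟨za, hzr⟩
      rw [e, keysT_resize, hfix.1]
      refine ⟨?_, SzOk_resize _ hfix.2⟩
      simp [keysT, ka, insD_append_lt v k _ hvk]
    · have e : put (RBT.node k c l r s) v = resize (fixup (RBT.node k c l r (s + 1))) := by
        simp only [put]
        rw [if_neg (by omega : ¬ k - v > 0), if_neg (by omega : ¬ k - v < 0)]
      subst hvk
      have hfix := fixup_spec (RBT.node v c l r (s + 1)) ⟨hzl, hzr⟩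
      rw [e, keysT_resize, hfix.1]
      refine ⟨?_, SzOk_resize _ hfix.2⟩
      simp only [keysT]
      rw [insD_append_self v _ _ hLk]
    · have e : put (RBT.node k c l r s) v = resize (fixup (RBT.node k c l (put r v) s)) := by
        simp only [put]
        rw [if_neg (by omega : ¬ k - v > 0), if_pos (by omega : k - v < 0)]
      obtain ⟨ka, za⟩ := ihr hsr hzr
      have hfix := fixup_spec (RBT.node k c l (put r v) s) ⟨hzl, za⟩
      rw [e, keysT_resize, hfix.1]
      refine ⟨?_, SzOk_resize _ hfix.2⟩
      simp only [keysT, ka]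
      rw [insD_append_gt v k _ _ (fun y hy => lt_trans (hLk y hy) hvk) hvk]

theorem rank_spec (t : RBT) (key : Int) :
    List.Pairwise (· < ·) (keysT t) → SzOk t →
    rank t key = (((keysT t).countP (fun v => decide (v ≤ key)) : Nat) : Int) := by
  induction t with
  | nil => intro _ _; rfl
  | node k c l r s ihl ihr =>
    intro hs hz
    simp only [SzOk] at hz
    obtain ⟨hzs, hzl, hzr⟩ := hz
    simp only [keysT] at hs ⊢
    obtain ⟨hsl, hsr, hLk, hkR⟩ := sorted_mid _ _ _ hs
    rw [List.countP_append, List.countP_cons]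
    rcases lt_trichotomy k key with hk | hk | hk
    · have hcl : (keysT l).countP (fun v => decide (v ≤ key)) = (keysT l).length :=
        List.countP_eq_length.2 (fun a ha => by simp; exact le_of_lt (lt_trans (hLk a ha) hk))
      simp only [rank]
      rw [if_pos (by omega : k - key < 0), ihr hsr hzr, sizeF_of_SzOk l hzl, hcl]
      simp [hk.le]
      ring
    · subst hk
      have hcl : (keysT l).countP (fun v => decide (v ≤ k)) = (keysT l).length :=
        List.countP_eq_length.2 (fun a ha => by simp; exact le_of_lt (hLk a ha))
      have hcr : (keysT r).countP (fun v => decide (v ≤ k)) = 0 :=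
        List.countP_eq_zero.2 (fun a ha => by simp; exact hkR a ha)
      simp only [rank]
      rw [if_neg (by omega : ¬ (k - k < 0)), if_neg (by omega : ¬ (k - k > 0)),
        sizeF_of_SzOk l hzl, hcl, hcr]
      simp
    · have hcr : (keysT r).countP (fun v => decide (v ≤ key)) = 0 :=
        List.countP_eq_zero.2 (fun a ha => by simp; exact lt_trans hk (hkR a ha))
      simp only [rank]
      rw [if_neg (by omega : ¬ (k - key < 0)), if_pos (by omega : k - key > 0), ihl hsl hzl, hcr]
      have hnk : ¬ (k ≤ key) := by omega
      simp [hnk]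
theorem foldA (l : List Int) : ∀ (t : RBT) (cs : List Int),
    List.Pairwise (· < ·) (keysT t) → SzOk t →
    (l.foldl (fun (st : RBT × List Int) x =>
        (put st.1 x, st.2 ++ [rank st.1 (PySem.Int.floordiv x 2)])) (t, cs)).2
      = cs ++ specFrom (keysT t) l := by
  induction l with
  | nil => intro t cs _ _; simp [specFrom]
  | cons x l' ih =>
    intro t cs hs hz
    obtain ⟨hk, hz'⟩ := put_spec t x hs hz
    have hs' : List.Pairwise (· < ·) (keysT (put t x)) := by rw [hk]; exact insD_sorted x _ hs
    simp only [List.foldl_cons]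
    rw [ih (put t x) _ hs' hz', hk, rank_spec t _ hs hz]
    simp [specFrom]

theorem insDs_sorted_mem (l : List Int) : ∀ (s : List Int), List.Pairwise (· < ·) s →
    List.Pairwise (· < ·) (insDs s l) ∧ (∀ y, y ∈ insDs s l ↔ y ∈ s ∨ y ∈ l) := by
  induction l with
  | nil => intro s hs; exact ⟨hs, by simp [insDs]⟩
  | cons x l' ih =>
    intro s hs
    have h1 := ih (insD x s) (insD_sorted x s hs)
    refine ⟨h1.1, fun y => ?_⟩
    rw [show insDs s (x :: l') = insDs (insD x s) l' from rfl, (h1.2 y), insD_mem]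
    simp
    tauto

theorem specFrom_append (l1 l2 : List Int) : ∀ s,
    specFrom s (l1 ++ l2) = specFrom s l1 ++ specFrom (insDs s l1) l2 := by
  induction l1 with
  | nil => intro s; simp [specFrom, insDs]
  | cons x l1' ih =>
    intro s
    simp only [List.cons_append, specFrom, ih (insD x s)]
    rfl

theorem altGo_fst (l : List Int) : (altGo l).1 = PySem.Set.ofList l.reverse := by
  induction l with
  | nil => rfl
  | cons x rest ih =>
    show PySem.Set.add (altGo rest).1 x = PySem.Set.ofList (x :: rest).reverse
    rw [ih, List.reverse_cons, PySem.Set.ofList_append]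
    rfl

theorem altGo_snd (l : List Int) : (altGo l).2 = (specFrom [] l.reverse).reverse := by
  induction l with
  | nil => rfl
  | cons x rest ih =>
    have hmem := insDs_sorted_mem rest.reverse [] (by simp)
    have hperm : ((altGo rest).1).Perm (insDs [] rest.reverse) := by
      refine (List.perm_ext_iff_of_nodup ?_ ?_).2 ?_
      · rw [altGo_fst]; exact PySem.Set.nodup_ofList _
      · exact (hmem.1).imp (fun h => ne_of_lt h)
      · intro a
        rw [altGo_fst, PySem.Set.mem_ofList, hmem.2 a]
        simp
    show (((altGo rest).1.countP (fun v => decide (v ≤ PySem.Int.floordiv x 2)) : Nat) : Int)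
        :: (altGo rest).2 = (specFrom [] (x :: rest).reverse).reverse
    rw [List.reverse_cons, specFrom_append rest.reverse [x] []]
    simp only [specFrom, List.reverse_append, List.reverse_cons, List.reverse_nil,
      List.nil_append, List.cons_append]
    rw [ih, List.Perm.countP_congr hperm (fun _ _ => rfl)]

theorem main_eq (arr : List Int) : count_half_suffix arr = count_half_suffix_alt arr := by
  show ((arr.reverse.foldl (fun (st : RBT × List Int) x =>
      (put st.1 x, st.2 ++ [rank st.1 (PySem.Int.floordiv x 2)])) (RBT.nil, [])).2).reverse
    = (altGo arr).2
  rw [foldA arr.reverse RBT.nil [] (by simp [keysT]) trivial, altGo_snd]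
  simp [keysT]

-- ===== VERDICT (by name: the statement is the Claim_ definition above) =====
theorem count_half_suffix_spec : Claim_equal_count_half_suffix := by
  intro arr _
  exact main_eq arr
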